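-- pv_equiv track=rewrite | github.com/kidlovecat/Python-Ptit | tong_chu_so_tich_chu_so.py | tich
-- ===== SOURCE A (Python) =====
-- def tich(s):
--     mul = 1
--     dem = 0
--     for i in range(len(s)):
--         if i%2 == 1:
--             a = int(s[i])
--             if a != 0:
--                 mul = mul * a
--             else:
--                 dem = dem + 1
--     if dem == int(len(s)/2):
--         mul = 0
--     return mul
-- ===== SOURCE B (Python) =====
-- def _prod(ds):
--     if not ds:
--         return 1
--     return ds[0] * _prod(ds[1:])
--
--
-- def tich(s):
--     digits = [int(c) for c in s[1::2]]
--     if all(d == 0 for d in digits):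
--         return 0
--     return _prod([d for d in digits if d != 0])
-- ===== Notes on version B (the rewrite author's own statement) =====
-- stated objective: simpler
-- what changed: A's single fused index loop carrying a product accumulator and a zero-counter compared against int(len(s)/2) is replaced by slicing out the odd-index digits with s[1::2], an all-zero test, and a recursive product of the nonzero digits.
import Mathlib
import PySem

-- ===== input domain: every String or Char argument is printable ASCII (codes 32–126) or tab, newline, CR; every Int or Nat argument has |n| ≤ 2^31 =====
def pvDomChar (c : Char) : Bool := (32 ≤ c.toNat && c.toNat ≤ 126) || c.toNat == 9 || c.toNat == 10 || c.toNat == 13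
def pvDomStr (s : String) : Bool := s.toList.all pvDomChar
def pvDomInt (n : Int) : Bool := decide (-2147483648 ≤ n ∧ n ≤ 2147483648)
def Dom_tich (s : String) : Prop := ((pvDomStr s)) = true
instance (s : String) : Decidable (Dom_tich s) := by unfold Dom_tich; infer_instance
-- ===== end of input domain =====

-- B replaces A's fused index loop (mul accumulator + zero counter vs len//2) by slicing out the
-- odd-index digits, an all-zero test, and a recursive product of the nonzero ones (objective: simpler).

-- int(c) for a one-character string c (shared by both ports; total form, Pre_ excludes the none case)
def pvCharInt (c : Char) : Int := (PySem.Int.ofChars? [c]).getD 0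

-- ===== PORT A =====
def tich (s : String) : Int :=
  let cs := s.toList
  let st := (PySem.List.pyRange 0 (PySem.Str.len s) 1).foldl
    (fun (st : Int × Int) i =>
      if PySem.Int.mod i 2 = 1 then
        let a := pvCharInt (PySem.List.pyGetD cs i ' ')
        if a ≠ 0 then (st.1 * a, st.2) else (st.1, st.2 + 1)
      else st) (1, 0)
  if st.2 = PySem.Int.floordiv (PySem.Str.len s) 2 then 0 else st.1

-- ===== PORT B =====
def pvProd : List Int → Int
  | [] => 1
  | d :: ds => d * pvProd ds

def tich_alt (s : String) : Int :=
  let digits := ((PySem.List.slice? s.toList (some 1) none 2).getD []).map pvCharInt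
  if digits.all (fun d => d == 0) then 0
  else pvProd (digits.filter (fun d => d ≠ 0))

-- ===== PRECONDITION & SPEC =====
-- Python A raises ValueError on int(s[i]) when a character at an odd index is not a digit;
-- Pre_ admits exactly the strings whose odd-index characters are all decimal digits.
def Pre_tich (s : String) : Prop :=
  ∀ p ∈ PySem.List.enumerate s.toList 0, PySem.Int.mod p.1 2 = 1 → ('0' ≤ p.2 ∧ p.2 ≤ '9')
instance (s : String) : Decidable (Pre_tich s) := by unfold Pre_tich; infer_instance
def pvWitness_tich : String := "a1b2"
def Spec_tich (s : String) (out : Int) : Prop := out = tich_alt s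
instance (s : String) (out : Int) : Decidable (Spec_tich s out) := by unfold Spec_tich; infer_instance

-- ===== CLAIM (what is proved, stated in full; the proofs are below) =====
def Claim_equal_tich : Prop := ∀ (s : String), Dom_tich s → Pre_tich s → Spec_tich s (tich s)

-- ===== LEMMAS AND PROOFS =====

-- elements of a list at odd positions
def odds : List Char → List Char
  | [] => []
  | [_] => []
  | _ :: y :: t => y :: odds t

lemma odds_length (cs : List Char) : (odds cs).length = cs.length / 2 := by
  induction cs using odds.induct with
  | case1 => simp [odds]
  | case2 => simp [odds]
  | case3 x y t ih => simp [odds, ih]; omega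

lemma enumerate_append_singleton {α : Type} (ys : List α) (y : α) (s : Int) :
    PySem.List.enumerate (ys ++ [y]) s
      = PySem.List.enumerate ys s ++ [(s + ys.length, y)] := by
  induction ys generalizing s with
  | nil => simp [PySem.List.enumerate_nil, PySem.List.enumerate_cons]
  | cons x xs ih =>
      simp [PySem.List.enumerate_cons, ih]
      omega

-- an index loop reading xs[i] is the loop over enumerate(xs)
lemma foldl_range_enum {β : Type} (xs : List Char) (d : Char) (g : β → Int → Char → β)
    (init : β) :
    (PySem.List.pyRange 0 (xs.length : Int) 1).foldl
        (fun st i => g st i (PySem.List.pyGetD xs i d)) init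
      = (PySem.List.enumerate xs 0).foldl (fun st p => g st p.1 p.2) init := by
  induction xs using List.reverseRecOn generalizing init with
  | nil => simp [PySem.List.pyRange_one_eq_nil, PySem.List.enumerate_nil]
  | append_singleton ys y ih =>
      have hlen : ((ys ++ [y]).length : Int) = (ys.length : Int) + 1 := by simp
      rw [hlen, PySem.List.pyRange_one_succ_right (by positivity),
        List.foldl_append, enumerate_append_singleton, List.foldl_append]
      have hcong : (PySem.List.pyRange 0 (ys.length : Int) 1).foldl
          (fun st i => g st i (PySem.List.pyGetD (ys ++ [y]) i d)) init
          = (PySem.List.pyRange 0 (ys.length : Int) 1).foldl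
          (fun st i => g st i (PySem.List.pyGetD ys i d)) init := by
        apply PySem.List.foldl_congr_mem
        intro acc i hi
        rw [PySem.List.mem_pyRange_one] at hi
        rw [PySem.List.pyGetD_eq_getElem (ys ++ [y]) d hi.1 (by simp; omega),
          PySem.List.pyGetD_eq_getElem ys d hi.1 (by exact_mod_cast hi.2),
          List.getElem_append_left (by omega)]
      rw [hcong, ih]
      simp [PySem.List.pyGetD_natCast]

lemma mod2_succ (s : Int) (h : s % 2 = 0) : PySem.Int.mod (s + 1) 2 = 1 := by
  rw [PySem.Int.mod_eq_emod_of_pos (by norm_num)]; omega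

lemma mod2_ne_one (s : Int) (h : s % 2 = 0) : ¬ PySem.Int.mod s 2 = 1 := by
  rw [PySem.Int.mod_eq_emod_of_pos (by norm_num)]; omega

-- A's loop body, over enumerate, computes the product of the nonzero odd-position digits
-- and the count of the zero ones
lemma enumFold (cs : List Char) (s mul dem : Int) (hs : s % 2 = 0) :
    (PySem.List.enumerate cs s).foldl
        (fun (st : Int × Int) p =>
          if PySem.Int.mod p.1 2 = 1 then
            if pvCharInt p.2 ≠ 0 then (st.1 * pvCharInt p.2, st.2) else (st.1, st.2 + 1)
          else st) (mul, dem)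
      = (mul * pvProd (((odds cs).map pvCharInt).filter (fun d => d ≠ 0)),
         dem + (((odds cs).map pvCharInt).countP (fun d => d = 0) : Int)) := by
  induction cs using odds.induct generalizing s mul dem with
  | case1 => simp [PySem.List.enumerate_nil, odds, pvProd]
  | case2 x =>
      simp only [PySem.List.enumerate_nil, PySem.List.enumerate_cons, List.foldl_cons,
        List.foldl_nil, mod2_ne_one s hs, if_false, odds, List.map_nil, List.filter_nil,
        List.countP_nil, pvProd]
      simp
  | case3 x y t ih =>
      rw [PySem.List.enumerate_cons, PySem.List.enumerate_cons]
      simp only [List.foldl_cons, mod2_ne_one s hs, if_false, mod2_succ s hs, if_true]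
      by_cases hy : pvCharInt y = 0
      · simp only [hy, ne_eq, not_true_eq_false, if_false]
        rw [show s + 1 + 1 = s + 2 by ring, ih (s + 2) mul (dem + 1) (by omega)]
        simp [odds, hy]
        ring
      · simp only [hy, ne_eq, not_false_eq_true, if_true]
        rw [show s + 1 + 1 = s + 2 by ring,
          ih (s + 2) (mul * pvCharInt y) dem (by omega)]
        simp [odds, hy, pvProd]
        ring

lemma filterMap_odds (xs : List Char) :
    (List.range (xs.length / 2)).filterMap (fun k => xs[1 + 2 * k]?) = odds xs := by
  induction xs using odds.induct with
  | case1 => simp [odds]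
  | case2 x => simp [odds]
  | case3 x y t ih =>
      have hl : (x :: y :: t).length / 2 = t.length / 2 + 1 := by
        simp only [List.length_cons]; omega
      rw [hl, List.range_succ_eq_map, List.filterMap_cons, List.filterMap_map]
      have hf : ∀ k : Nat, (x :: y :: t)[1 + 2 * (Nat.succ k)]? = t[1 + 2 * k]? := by
        intro k
        have h3 : 1 + 2 * (Nat.succ k) = (1 + 2 * k) + 1 + 1 := by omega
        rw [h3, List.getElem?_cons_succ, List.getElem?_cons_succ]
      simp only [Function.comp_def, hf]
      simp [odds, ih]

-- s[1::2] is the list of odd-position elements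
lemma slice_odd (xs : List Char) :
    PySem.List.slice? xs (some 1) none 2 = some (odds xs) := by
  rw [PySem.List.slice?, PySem.List.sliceIndices]
  norm_num
  rcases xs with _ | ⟨x, t⟩
  · simp [odds]
  · have hn : (1:Int) ≤ ((x :: t).length : Int) := by simp
    rw [min_eq_left hn]
    have hcount : (if 1 < (x :: t).length then
        ((((x :: t).length : Int) - 1 + 2 - 1) / 2).toNat else 0) = (x :: t).length / 2 := by
      split_ifs with h <;> omega
    rw [hcount]
    have hidx : ∀ k : Nat, ((1 : Int) + 2 * (k : Int)).toNat = 1 + 2 * k := by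
      intro k; omega
    simp only [hidx]
    rw [filterMap_odds]

lemma countP_cast_eq_iff (l : List Int) :
    ((l.countP (fun d => d = 0) : Int) = (l.length : Int)) ↔ (l.all (fun d => d == 0)) = true := by
  rw [Nat.cast_inj, List.countP_eq_length, List.all_eq_true]
  simp

-- ===== VERDICT (by name: the statement is the Claim_ definition above) =====
theorem tich_spec : Claim_equal_tich := by
  intro s _ _
  unfold Spec_tich tich tich_alt
  simp only [PySem.Str.len_eq]
  rw [foldl_range_enum s.toList ' '
      (fun st i c =>
        if PySem.Int.mod i 2 = 1 then
          if pvCharInt c ≠ 0 then (st.1 * pvCharInt c, st.2) else (st.1, st.2 + 1)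
        else st) ((1 : Int), (0 : Int)),
    enumFold s.toList 0 1 0 (by decide), slice_odd]
  have hfd : PySem.Int.floordiv ((s.toList.length : Nat) : Int) 2
      = ((s.toList.length / 2 : Nat) : Int) := by
    exact_mod_cast PySem.Int.floordiv_natCast s.toList.length 2
  rw [hfd]
  set digits := (odds s.toList).map pvCharInt with hd
  have hlen : digits.length = s.toList.length / 2 := by
    rw [hd, List.length_map, odds_length]
  rw [← hlen, Option.getD_some]
  by_cases hall : (digits.all (fun d => d == 0)) = true
  · rw [if_pos hall, if_pos]
    rw [zero_add]
    exact (countP_cast_eq_iff digits).mpr hall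
  · rw [if_neg hall, if_neg, one_mul]
    rw [zero_add]
    exact fun h => hall ((countP_cast_eq_iff digits).mp h)
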